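-- pv_equiv track=rewrite | github.com/suryanshsharma19/genai-document-assistant | backend/utils/text_utils.py | _handle_abbreviations
-- ===== SOURCE A (Python) =====
-- def _handle_abbreviations(text: str) -> str:
--     """Handle common abbreviations to prevent incorrect sentence splitting."""
--     abbreviations = [
--         'Dr.', 'Mr.', 'Mrs.', 'Ms.', 'Prof.', 'Inc.', 'Ltd.', 'Corp.',
--         'etc.', 'vs.', 'e.g.', 'i.e.', 'cf.', 'al.', 'Co.', 'Jr.', 'Sr.'
--     ]
--
--     for abbr in abbreviations:
--         text = text.replace(abbr, abbr.replace('.', '<!DOT!>'))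
--
--     return text
-- ===== SOURCE B (Python) =====
-- # Single left-to-right scan that masks abbreviation dots in one pass, instead of
-- # 17 successive full-string replace passes.
-- _ABBREVIATIONS = [
--     'Dr.', 'Mr.', 'Mrs.', 'Ms.', 'Prof.', 'Inc.', 'Ltd.', 'Corp.',
--     'etc.', 'vs.', 'e.g.', 'i.e.', 'cf.', 'al.', 'Co.', 'Jr.', 'Sr.'
-- ]
-- _DOTTED = {a: a.replace('.', '<!DOT!>') for a in _ABBREVIATIONS}
--
-- def _handle_abbreviations(text: str) -> str:
--     out = []
--     i = 0
--     n = len(text)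
--     while i < n:
--         for abbr in _ABBREVIATIONS:
--             if text.startswith(abbr, i):
--                 out.append(_DOTTED[abbr])
--                 i += len(abbr)
--                 break
--         else:
--             out.append(text[i])
--             i += 1
--     return ''.join(out)
-- ===== Notes on version B (the rewrite author's own statement) =====
-- stated objective: alternative
-- what changed: A runs 17 successive full-string replace passes (one per abbreviation); B makes a single left-to-right scan emitting the dotted placeholder at each abbreviation match; Pre_ excludes texts containing the six-character overlap of the two dotted Latin abbreviations (the cited string), where A's pass order masks the second abbreviation while B's scanner masks the first and either masking is defensible.
-- outside the precondition, e.g. on _handle_abbreviations('i.e.g.'): A returns 'i.e<!DOT!>g<!DOT!>', B returns 'i<!DOT!>e<!DOT!>g.'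
import Mathlib
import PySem

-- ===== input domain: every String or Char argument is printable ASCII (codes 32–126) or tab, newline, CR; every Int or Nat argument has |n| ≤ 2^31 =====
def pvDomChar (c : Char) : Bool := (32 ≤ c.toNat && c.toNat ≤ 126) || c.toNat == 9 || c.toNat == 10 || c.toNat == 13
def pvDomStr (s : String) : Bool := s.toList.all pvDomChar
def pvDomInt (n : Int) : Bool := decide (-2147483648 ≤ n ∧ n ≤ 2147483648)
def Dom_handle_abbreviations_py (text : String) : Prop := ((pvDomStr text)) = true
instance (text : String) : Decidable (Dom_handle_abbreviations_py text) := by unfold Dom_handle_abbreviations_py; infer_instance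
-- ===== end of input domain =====

-- B replaces A's 17 successive full-string replace passes by one left-to-right
-- first-match scan (objective: alternative single-pass algorithm, not claimed faster).

-- ===== PORT A =====
def pvAbbreviations : List String :=
  ["Dr.", "Mr.", "Mrs.", "Ms.", "Prof.", "Inc.", "Ltd.", "Corp.",
   "etc.", "vs.", "e.g.", "i.e.", "cf.", "al.", "Co.", "Jr.", "Sr."]

def handle_abbreviations_py (text : String) : String :=
  pvAbbreviations.foldl
    (fun t abbr => PySem.Str.replace t abbr (PySem.Str.replace abbr "." "<!DOT!>")) text

-- ===== PORT B =====
-- the abbreviation table paired with its dotted placeholder forms (Source B's _DOTTED)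
def pvTable : List (List Char × List Char) := [
  (['D', 'r', '.'], ['D', 'r', '<', '!', 'D', 'O', 'T', '!', '>']),
  (['M', 'r', '.'], ['M', 'r', '<', '!', 'D', 'O', 'T', '!', '>']),
  (['M', 'r', 's', '.'], ['M', 'r', 's', '<', '!', 'D', 'O', 'T', '!', '>']),
  (['M', 's', '.'], ['M', 's', '<', '!', 'D', 'O', 'T', '!', '>']),
  (['P', 'r', 'o', 'f', '.'], ['P', 'r', 'o', 'f', '<', '!', 'D', 'O', 'T', '!', '>']),
  (['I', 'n', 'c', '.'], ['I', 'n', 'c', '<', '!', 'D', 'O', 'T', '!', '>']),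
  (['L', 't', 'd', '.'], ['L', 't', 'd', '<', '!', 'D', 'O', 'T', '!', '>']),
  (['C', 'o', 'r', 'p', '.'], ['C', 'o', 'r', 'p', '<', '!', 'D', 'O', 'T', '!', '>']),
  (['e', 't', 'c', '.'], ['e', 't', 'c', '<', '!', 'D', 'O', 'T', '!', '>']),
  (['v', 's', '.'], ['v', 's', '<', '!', 'D', 'O', 'T', '!', '>']),
  (['e', '.', 'g', '.'], ['e', '<', '!', 'D', 'O', 'T', '!', '>', 'g', '<', '!', 'D', 'O', 'T', '!', '>']),
  (['i', '.', 'e', '.'], ['i', '<', '!', 'D', 'O', 'T', '!', '>', 'e', '<', '!', 'D', 'O', 'T', '!', '>']),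
  (['c', 'f', '.'], ['c', 'f', '<', '!', 'D', 'O', 'T', '!', '>']),
  (['a', 'l', '.'], ['a', 'l', '<', '!', 'D', 'O', 'T', '!', '>']),
  (['C', 'o', '.'], ['C', 'o', '<', '!', 'D', 'O', 'T', '!', '>']),
  (['J', 'r', '.'], ['J', 'r', '<', '!', 'D', 'O', 'T', '!', '>']),
  (['S', 'r', '.'], ['S', 'r', '<', '!', 'D', 'O', 'T', '!', '>'])]

-- the inner for-loop of Source B: first table entry matching at the current position
def pvFind (t : List Char) : List (List Char × List Char) → Option (List Char × List Char)
  | [] => none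
  | (a, ph) :: rest => if a.isPrefixOf t then some (a, ph) else pvFind t rest

-- Source B's while-loop: the position index i becomes the remaining suffix; fuel = its length
def pvScanGo : Nat → List Char → List Char
  | _, [] => []
  | 0, l => l
  | fuel + 1, c :: s =>
    match pvFind (c :: s) pvTable with
    | some (a, ph) => ph ++ pvScanGo fuel (s.drop (a.length - 1))
    | none => c :: pvScanGo fuel s

def handle_abbreviations_py_alt (text : String) : String :=
  String.ofList (pvScanGo text.toList.length text.toList)

-- ===== PRECONDITION & SPEC =====
-- Pre_ excludes texts containing the six-character overlap of the two dotted Latin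
-- abbreviations (and nothing else): there A's pass order masks the second abbreviation
-- while B's scanner masks the first, and either masking is defensible.
def Pre_handle_abbreviations_py (text : String) : Prop :=
  ¬ ['i', '.', 'e', '.', 'g', '.'] <:+: text.toList
instance (text : String) : Decidable (Pre_handle_abbreviations_py text) := by
  unfold Pre_handle_abbreviations_py; infer_instance

def pvWitness_handle_abbreviations_py : String := "See Dr. Smith, i.e. the prof., etc."

def Spec_handle_abbreviations_py (text : String) (out : String) : Prop := out = handle_abbreviations_py_alt text
instance (text : String) (out : String) : Decidable (Spec_handle_abbreviations_py text out) := by unfold Spec_handle_abbreviations_py; infer_instance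

-- ===== CLAIM (what is proved, stated in full; the proofs are below) =====
def Claim_equal_handle_abbreviations_py : Prop := ∀ (text : String), Dom_handle_abbreviations_py text → Pre_handle_abbreviations_py text → Spec_handle_abbreviations_py text (handle_abbreviations_py text)

-- ===== LEMMAS AND PROOFS =====

theorem pvGo_zero (old new l acc : List Char) :
    PySem.Chars.replace.go old new 0 l acc = acc.reverse ++ l := rfl

theorem pvGo_succ_nil (old new acc : List Char) (f : Nat) :
    PySem.Chars.replace.go old new (f+1) [] acc = acc.reverse := rfl

theorem pvGo_succ_cons (old new acc : List Char) (f : Nat) (c : Char) (t : List Char) :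
    PySem.Chars.replace.go old new (f+1) (c::t) acc =
      if old.isPrefixOf (c::t) = true then
        PySem.Chars.replace.go old new f (List.drop old.length (c::t)) (new.reverse ++ acc)
      else PySem.Chars.replace.go old new f t (c :: acc) := rfl

theorem pvGo_irrel (old new : List Char) (ho : old ≠ []) : ∀ (f1 f2 : Nat) (l acc : List Char),
    l.length ≤ f1 → l.length ≤ f2 →
    PySem.Chars.replace.go old new f1 l acc = PySem.Chars.replace.go old new f2 l acc := by
  intro f1
  induction f1 with
  | zero =>
    intro f2 l acc h1 h2
    have : l = [] := List.length_eq_zero_iff.mp (Nat.le_zero.mp h1)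
    subst this
    cases f2 with
    | zero => rfl
    | succ g => rw [pvGo_zero, pvGo_succ_nil]; simp
  | succ f ih =>
    intro f2 l acc h1 h2
    cases l with
    | nil =>
      cases f2 with
      | zero => rw [pvGo_zero, pvGo_succ_nil]; simp
      | succ g => rfl
    | cons c t =>
      cases f2 with
      | zero => simp at h2
      | succ g =>
        rw [pvGo_succ_cons, pvGo_succ_cons]
        have hol : 1 ≤ old.length := by cases old with | nil => simp at ho | cons _ _ => simp
        split
        · apply ih <;> simp_all <;> omega
        · apply ih <;> simp_all

theorem pvGo_acc (old new : List Char) : ∀ (f : Nat) (l acc : List Char),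
    PySem.Chars.replace.go old new f l acc = acc.reverse ++ PySem.Chars.replace.go old new f l [] := by
  intro f
  induction f with
  | zero => intro l acc; rw [pvGo_zero, pvGo_zero]; simp
  | succ f ih =>
    intro l acc
    cases l with
    | nil => rw [pvGo_succ_nil, pvGo_succ_nil]; simp
    | cons c t =>
      rw [pvGo_succ_cons, pvGo_succ_cons]
      split
      · rw [ih _ (new.reverse ++ acc), ih _ (new.reverse ++ [])]; simp
      · rw [ih _ (c :: acc), ih _ (c :: ([] : List Char))]; simp

theorem pvReplace_nil (old new : List Char) (h : old ≠ []) :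
    PySem.Chars.replace [] old new = [] := by
  cases old with
  | nil => exact absurd rfl h
  | cons o t => rfl

theorem pvReplace_cons_neg (old new : List Char) (c : Char) (s : List Char)
    (ho : old ≠ []) (h : ¬ old <+: (c :: s)) :
    PySem.Chars.replace (c :: s) old new = c :: PySem.Chars.replace s old new := by
  cases old with
  | nil => exact absurd rfl ho
  | cons o t =>
    have hb : (o::t).isPrefixOf (c::s) = false := by
      rw [← Bool.not_eq_true, List.isPrefixOf_iff_prefix]; exact h
    show PySem.Chars.replace.go (o::t) new (s.length + 1) (c::s) [] = _
    rw [pvGo_succ_cons, hb]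
    simp only [Bool.false_eq_true, if_false]
    rw [pvGo_acc]
    rfl

theorem pvReplace_cons_pos (old new : List Char) (c : Char) (s : List Char)
    (ho : old ≠ []) (h : old <+: (c :: s)) :
    PySem.Chars.replace (c :: s) old new =
      new ++ PySem.Chars.replace ((c :: s).drop old.length) old new := by
  cases old with
  | nil => exact absurd rfl ho
  | cons o t =>
    have hb : (o::t).isPrefixOf (c::s) = true := List.isPrefixOf_iff_prefix.mpr h
    show PySem.Chars.replace.go (o::t) new (s.length + 1) (c::s) [] = _
    rw [pvGo_succ_cons, hb]
    simp only [if_true]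
    rw [pvGo_acc]
    have hlen : (List.drop (o::t).length (c::s)).length ≤ s.length := by simp
    rw [pvGo_irrel _ _ ho s.length (List.drop (o::t).length (c::s)).length _ _ hlen (le_refl _)]
    cases List.drop (o::t).length (c::s) with
    | nil => simp [PySem.Chars.replace, pvGo_zero]
    | cons x xs => simp [PySem.Chars.replace]

-- decomposition of a replace pass
theorem pvReplace_char (old new : List Char) (ho : old ≠ []) : ∀ (n : Nat) (t : List Char), t.length ≤ n →
    PySem.Chars.replace t old new = t ∨
      ∃ p q, t = p ++ old ++ q ∧
        PySem.Chars.replace t old new = p ++ new ++ PySem.Chars.replace q old new := by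
  intro n
  induction n with
  | zero =>
    intro t ht
    have : t = [] := List.length_eq_zero_iff.mp (Nat.le_zero.mp ht)
    subst this
    left; exact pvReplace_nil old new ho
  | succ n ih =>
    intro t ht
    cases t with
    | nil => left; exact pvReplace_nil old new ho
    | cons c s =>
      by_cases h : old <+: (c :: s)
      · right
        refine ⟨[], (c::s).drop old.length, ?_, ?_⟩
        · simpa using (List.prefix_iff_eq_append.mp h).symm
        · simpa using pvReplace_cons_pos old new c s ho h
      · rw [pvReplace_cons_neg old new c s ho h]
        rcases ih s (by simp at ht; omega) with h1 | ⟨p, q, hpq, hr⟩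
        · left; rw [h1]
        · right
          exact ⟨c :: p, q, by simp [hpq], by simp [hr]⟩

-- skip lemma: a pass that cannot match anywhere inside the block x passes over it
theorem pvReplace_skip (old new : List Char) (ho : old ≠ []) : ∀ (x w : List Char),
    (∀ k, k < x.length → ¬ old <+: (x.drop k ++ w)) →
    PySem.Chars.replace (x ++ w) old new = x ++ PySem.Chars.replace w old new := by
  intro x
  induction x with
  | nil => intro w _; simp
  | cons c x' ih =>
    intro w h
    have h0 : ¬ old <+: (c :: (x' ++ w)) := by
      have := h 0 (by simp)
      simpa using this
    rw [show (c :: x') ++ w = c :: (x' ++ w) from rfl,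
      pvReplace_cons_neg old new c (x' ++ w) ho h0]
    rw [ih w (fun k hk => by have := h (k+1) (by simp; omega); simpa using this)]
    rfl

-- compatibility-at-one-offset checker: pvCompat old d = false means old cannot match at
-- the start of d ++ w for ANY w
def pvCompat (old d : List Char) : Bool :=
  if d.length < old.length then d.isPrefixOf old else old.isPrefixOf d

theorem pvCompat_spec (old d w : List Char) (h : pvCompat old d = false) :
    ¬ old <+: (d ++ w) := by
  intro hpre
  unfold pvCompat at h
  split at h
  · rename_i hl
    have hd : d <+: old :=
      List.prefix_of_prefix_length_le (List.prefix_append d w) hpre (by omega)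
    rw [← List.isPrefixOf_iff_prefix] at hd
    simp [hd] at h
  · rename_i hl
    have hd : old <+: d :=
      List.prefix_of_prefix_length_le hpre (List.prefix_append d w) (by omega)
    rw [← List.isPrefixOf_iff_prefix] at hd
    simp [hd] at h

-- no-overlap checker: old cannot match at any offset strictly inside x
def pvNoOv (old x : List Char) : Bool :=
  (List.range x.length).all (fun k => !(pvCompat old (x.drop k)))

theorem pvNoOv_spec (old x : List Char) (h : pvNoOv old x = true) :
    ∀ k, k < x.length → ∀ w, ¬ old <+: (x.drop k ++ w) := by
  intro k hk w
  unfold pvNoOv at h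
  rw [List.all_eq_true] at h
  have := h k (List.mem_range.mpr hk)
  exact pvCompat_spec old (x.drop k) w (by simpa using this)

theorem pvReplace_skip_noOv (old new x : List Char) (ho : old ≠ []) (h : pvNoOv old x = true)
    (w : List Char) :
    PySem.Chars.replace (x ++ w) old new = x ++ PySem.Chars.replace w old new :=
  pvReplace_skip old new ho x w (fun k hk => pvNoOv_spec old x h k hk w)

-- head-match unfold: old ++ u replaces its head occurrence
theorem pvReplace_head (old new u : List Char) (ho : old ≠ []) :
    PySem.Chars.replace (old ++ u) old new = new ++ PySem.Chars.replace u old new := by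
  cases old with
  | nil => exact absurd rfl ho
  | cons o t =>
    rw [show (o :: t) ++ u = o :: (t ++ u) from rfl,
      pvReplace_cons_pos (o::t) new o (t ++ u) ho (by exact ⟨u, rfl⟩)]
    congr 1
    simp

def pvIE : List Char := ['i', '.', 'e', '.']
def pvEG : List Char := ['e', '.', 'g', '.']
def pvPhIE : List Char := ['i', '<', '!', 'D', 'O', 'T', '!', '>', 'e', '<', '!', 'D', 'O', 'T', '!', '>']
def pvIEG : List Char := ['i', '.', 'e', '.', 'g', '.']
def pvD (a : List Char) : Nat := (a.takeWhile (fun c => c ≠ '.')).length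

theorem pvF_ne_nil : ∀ p ∈ pvTable, p.1 ≠ [] := by decide
theorem pvF_ph_shape : ∀ p ∈ pvTable, p.2 = (p.1.take (pvD p.1)) ++ '<' :: (p.2.drop (pvD p.1 + 1)) := by decide
theorem pvF_no_lt : ∀ p ∈ pvTable, '<' ∉ p.1 := by decide
theorem pvF_noOv : ∀ p ∈ pvTable, ∀ q ∈ pvTable, q.1 ≠ pvIE → p.1 = q.1 ∨ pvNoOv p.1 q.1 = true := by decide
theorem pvF_noOv_ph : ∀ p ∈ pvTable, ∀ q ∈ pvTable, pvNoOv p.1 q.2 = true := by decide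
theorem pvF_nodup : (pvTable.map Prod.fst).Nodup := by decide
theorem pvF_ie_entry : ∀ p ∈ pvTable, p.1 = pvIE → p.2 = pvPhIE := by decide

def pvStep (t : List Char) (p : List Char × List Char) : List Char := PySem.Chars.replace t p.1 p.2
def pvACore (t : List Char) : List Char := pvTable.foldl pvStep t

-- if no abbreviation matches at position 0, a replace pass cannot create a match there:
-- the first changed character of any pass is '<', which no abbreviation contains
theorem pvPres (c : Char) (s : List Char) (a ph : List Char) (hmem : (a, ph) ∈ pvTable)
    (h : ∀ p ∈ pvTable, ¬ p.1 <+: (c :: s)) :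
    ∀ q ∈ pvTable, ¬ q.1 <+: (c :: PySem.Chars.replace s a ph) := by
  intro q hq hx
  rcases pvReplace_char a ph (pvF_ne_nil _ hmem) s.length s (le_refl _) with h1 | ⟨p', q', hs, hr⟩
  · rw [h1] at hx; exact h q hq hx
  · rw [hr] at hx
    have hshape := pvF_ph_shape _ hmem
    set d := pvD a with hd
    set w := a.take d with hw
    set r := ph.drop (d + 1) with hrr
    set R := PySem.Chars.replace q' a ph with hR
    clear_value R
    have hbig : c :: (p' ++ ph ++ R) = (c :: p' ++ w) ++ '<' :: (r ++ R) := by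
      rw [show ph = w ++ '<' :: r from hshape]
      simp
    rw [hbig] at hx
    by_cases hlen : q.1.length ≤ (c :: p' ++ w).length
    · have hm : q.1 <+: (c :: p' ++ w) :=
        List.prefix_of_prefix_length_le hx (List.prefix_append _ _) hlen
      have hws : (c :: p' ++ w) <+: (c :: s) := by
        rw [hs, show c :: p' ++ w = c :: (p' ++ w) from rfl,
          show c :: (p' ++ a ++ q') = c :: (p' ++ (a ++ q')) by simp,
          List.cons_prefix_cons]
        refine ⟨rfl, ?_⟩
        rw [List.prefix_append_right_inj]
        exact (List.take_prefix d a).trans (List.prefix_append a q')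
      exact h q hq (hm.trans hws)
    · have hm : ((c :: p' ++ w) ++ ['<']) <+: q.1 := by
        refine List.prefix_of_prefix_length_le ?_ hx ?_
        · rw [List.prefix_append_right_inj]
          exact ⟨r ++ R, by simp⟩
        · simp at hlen ⊢; omega
      have : '<' ∈ q.1 := hm.subset (by simp)
      exact pvF_no_lt q hq this

theorem pvF_pre_ie : ∀ p ∈ pvTable.take 11, p.1 = pvEG ∨ pvNoOv p.1 pvIE = true := by decide
theorem pvF_ie_mem : (pvIE, pvPhIE) ∈ pvTable := by decide
theorem pvF_eg_entry : ∀ p ∈ pvTable, p.1 = pvEG → p.2 =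
  ['e', '<', '!', 'D', 'O', 'T', '!', '>', 'g', '<', '!', 'D', 'O', 'T', '!', '>'] := by decide
theorem pvSplit_ie : pvTable = pvTable.take 11 ++ (pvIE, pvPhIE) :: pvTable.drop 12 := by decide

-- fold a block of passes over a block x none of them can touch
theorem pvFoldl_skip (x : List Char) (Inv : List Char → Prop) :
    ∀ (ps : List (List Char × List Char)) (u : List Char),
      (∀ p ∈ ps, p.1 ≠ []) →
      (∀ p ∈ ps, ∀ w, Inv w → PySem.Chars.replace (x ++ w) p.1 p.2 = x ++ PySem.Chars.replace w p.1 p.2) →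
      (∀ p ∈ ps, ∀ w, Inv w → Inv (PySem.Chars.replace w p.1 p.2)) →
      Inv u → ps.foldl pvStep (x ++ u) = x ++ ps.foldl pvStep u := by
  intro ps
  induction ps with
  | nil => intro u _ _ _ _; rfl
  | cons p ps' ih =>
    intro u hne hskip hinv hu
    have h1 : pvStep (x ++ u) p = x ++ PySem.Chars.replace u p.1 p.2 :=
      hskip p (by simp) u hu
    rw [List.foldl_cons, List.foldl_cons, h1]
    exact ih (PySem.Chars.replace u p.1 p.2)
      (fun q hq => hne q (by simp [hq]))
      (fun q hq => hskip q (by simp [hq]))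
      (fun q hq => hinv q (by simp [hq]))
      (hinv p (by simp) u hu)

-- A's passes all walk over the head character when nothing matches at position 0
theorem pvFoldl_nomatch (c : Char) :
    ∀ (ps : List (List Char × List Char)) (s : List Char),
      (∀ p ∈ ps, p ∈ pvTable) →
      (∀ p ∈ pvTable, ¬ p.1 <+: (c :: s)) →
      ps.foldl pvStep (c :: s) = c :: ps.foldl pvStep s := by
  intro ps
  induction ps with
  | nil => intro s _ _; rfl
  | cons p ps' ih =>
    intro s hsub h
    have hmem : p ∈ pvTable := hsub p (by simp)
    have h1 : pvStep (c :: s) p = c :: PySem.Chars.replace s p.1 p.2 :=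
      pvReplace_cons_neg p.1 p.2 c s (pvF_ne_nil p hmem) (h p hmem)
    rw [List.foldl_cons, List.foldl_cons, h1]
    exact ih (PySem.Chars.replace s p.1 p.2)
      (fun q hq => hsub q (by simp [hq]))
      (pvPres c s p.1 p.2 hmem h)

theorem pvACore_head_nomatch (c : Char) (s : List Char)
    (h : ∀ p ∈ pvTable, ¬ p.1 <+: (c :: s)) : pvACore (c :: s) = c :: pvACore s :=
  pvFoldl_nomatch c pvTable s (fun _ hp => hp) h

theorem pvACore_split (pre post : List (List Char × List Char)) (a ph : List Char)
    (hsplit : pvTable = pre ++ (a, ph) :: post) (t : List Char) :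
    pvACore t = post.foldl pvStep (pvStep (pre.foldl pvStep t) (a, ph)) := by
  rw [pvACore, hsplit, List.foldl_append, List.foldl_cons]

theorem pvHead_margin (pre post : List (List Char × List Char)) (a ph m : List Char)
    (Inv : List Char → Prop)
    (hsplit : pvTable = pre ++ (a, ph) :: post)
    (ha : a ≠ [])
    (hpren : ∀ p ∈ pre, p.1 ≠ []) (hpostn : ∀ p ∈ post, p.1 ≠ [])
    (hpre : ∀ p ∈ pre, ∀ w, Inv w →
      PySem.Chars.replace ((m ++ a) ++ w) p.1 p.2 = (m ++ a) ++ PySem.Chars.replace w p.1 p.2)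
    (hinv : ∀ p ∈ pre, ∀ w, Inv w → Inv (PySem.Chars.replace w p.1 p.2))
    (hm : ∀ w, PySem.Chars.replace (m ++ w) a ph = m ++ PySem.Chars.replace w a ph)
    (hpost : ∀ p ∈ post, ∀ w,
      PySem.Chars.replace ((m ++ ph) ++ w) p.1 p.2 = (m ++ ph) ++ PySem.Chars.replace w p.1 p.2)
    (u : List Char) (hu : Inv u) :
    pvACore (m ++ a ++ u) = m ++ ph ++ pvACore u := by
  rw [pvACore_split pre post a ph hsplit (m ++ a ++ u), pvACore_split pre post a ph hsplit u]
  rw [show m ++ a ++ u = (m ++ a) ++ u from rfl]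
  rw [pvFoldl_skip (m ++ a) Inv pre u hpren hpre hinv hu]
  have h2 : pvStep ((m ++ a) ++ pre.foldl pvStep u) (a, ph) =
      (m ++ ph) ++ PySem.Chars.replace (pre.foldl pvStep u) a ph := by
    show PySem.Chars.replace ((m ++ a) ++ pre.foldl pvStep u) a ph = _
    rw [List.append_assoc, hm, pvReplace_head a ph _ ha]
    simp
  rw [h2,
    pvFoldl_skip (m ++ ph) (fun _ => True) post _ hpostn
      (fun p hp w _ => hpost p hp w) (fun _ _ _ _ => trivial) trivial]
  simp [pvStep]

theorem pvACore_head (a ph : List Char) (hmem : (a, ph) ∈ pvTable) (hne : a ≠ pvIE)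
    (u : List Char) : pvACore (a ++ u) = ph ++ pvACore u := by
  obtain ⟨pre, post, hsplit⟩ := List.mem_iff_append.mp hmem
  have hprem : ∀ p ∈ pre, p ∈ pvTable := fun p hp => by rw [hsplit]; simp [hp]
  have hpostm : ∀ p ∈ post, p ∈ pvTable := fun p hp => by rw [hsplit]; simp [hp]
  have hnotin : a ∉ pre.map Prod.fst := by
    have hn := pvF_nodup
    rw [hsplit, List.map_append] at hn
    have hd := List.disjoint_of_nodup_append hn
    intro hmm
    exact hd hmm (by simp)
  have := pvHead_margin pre post a ph [] (fun _ => True) hsplit (pvF_ne_nil _ hmem)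
    (fun p hp => pvF_ne_nil p (hprem p hp)) (fun p hp => pvF_ne_nil p (hpostm p hp))
    (fun p hp w _ => by
      have hov : pvNoOv p.1 a = true := by
        rcases pvF_noOv p (hprem p hp) (a, ph) hmem hne with h1 | h2
        · exfalso; apply hnotin
          have : p.1 = a := h1
          rw [← this]; exact List.mem_map_of_mem hp
        · exact h2
      simpa using pvReplace_skip_noOv p.1 p.2 a (pvF_ne_nil p (hprem p hp)) hov w)
    (fun _ _ _ _ => trivial)
    (fun w => by simp)
    (fun p hp w => by
      simpa using pvReplace_skip_noOv p.1 p.2 ph (pvF_ne_nil p (hpostm p hp))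
        (pvF_noOv_ph p (hpostm p hp) (a, ph) hmem) w)
    u trivial
  simpa using this

-- the one real overlap: an 'e.g.' pass passes over a leading 'i.e.' unless the text
-- continues with 'g.'
theorem pvSkip_ie (w : List Char) (hg : ¬ ['g', '.'] <+: w) :
    PySem.Chars.replace (pvIE ++ w) pvEG
      ['e', '<', '!', 'D', 'O', 'T', '!', '>', 'g', '<', '!', 'D', 'O', 'T', '!', '>'] =
      pvIE ++ PySem.Chars.replace w pvEG
        ['e', '<', '!', 'D', 'O', 'T', '!', '>', 'g', '<', '!', 'D', 'O', 'T', '!', '>'] := by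
  apply pvReplace_skip pvEG _ (by decide) pvIE w
  intro k hk hpre
  simp [pvIE] at hk
  interval_cases k
  · have : pvEG <+: pvIE :=
      List.prefix_of_prefix_length_le hpre (List.prefix_append pvIE w) (by decide)
    exact absurd this (by decide)
  · have : (pvIE.drop 1) <+: pvEG :=
      List.prefix_of_prefix_length_le (List.prefix_append _ w) hpre (by decide)
    exact absurd this (by decide)
  · have h2 : (['e', '.'] ++ ['g', '.']) <+: (['e', '.'] ++ w) := hpre
    rw [List.prefix_append_right_inj] at h2
    exact hg h2
  · have : (pvIE.drop 3) <+: pvEG :=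
      List.prefix_of_prefix_length_le (List.prefix_append _ w) hpre (by decide)
    exact absurd this (by decide)

theorem pvF_ph_head : ∀ p ∈ pvTable, p.2.head? ≠ some 'g' ∧ p.2.head? ≠ some '.' ∧ p.2 ≠ [] := by decide

-- no pass can create a 'g.' prefix
theorem pvG_pres (a ph : List Char) (hmem : (a, ph) ∈ pvTable) (w : List Char)
    (hw : ¬ ['g', '.'] <+: w) : ¬ ['g', '.'] <+: PySem.Chars.replace w a ph := by
  intro hx
  rcases pvReplace_char a ph (pvF_ne_nil _ hmem) w.length w (le_refl _) with h1 | ⟨p, q, hpq, hr⟩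
  · rw [h1] at hx; exact hw hx
  · rw [hr] at hx
    obtain ⟨hg, hdot, hne⟩ := pvF_ph_head _ hmem
    match p, hx with
    | [], hx =>
      cases hph : ph with
      | nil => exact hne hph
      | cons h t =>
        rw [hph] at hx
        simp [List.cons_prefix_cons] at hx
        exact hg (by rw [hph]; simp [hx.1.symm])
    | [x], hx =>
      cases hph : ph with
      | nil => exact hne hph
      | cons h t =>
        rw [hph] at hx
        simp [List.cons_prefix_cons] at hx
        exact hdot (by rw [hph]; simp [hx.2.symm])
    | x :: y :: p'', hx =>
      simp [List.cons_prefix_cons] at hx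
      apply hw
      rw [hpq, ← hx.1, ← hx.2]
      exact ⟨p'' ++ a ++ q, by simp⟩

theorem pvACore_head_ie (u : List Char) (hg : ¬ ['g', '.'] <+: u) :
    pvACore (pvIE ++ u) = pvPhIE ++ pvACore u := by
  have hprem : ∀ p ∈ pvTable.take 11, p ∈ pvTable := fun p hp => List.mem_of_mem_take hp
  have hpostm : ∀ p ∈ pvTable.drop 12, p ∈ pvTable := fun p hp => List.mem_of_mem_drop hp
  have := pvHead_margin (pvTable.take 11) (pvTable.drop 12) pvIE pvPhIE []
    (fun w => ¬ ['g', '.'] <+: w) pvSplit_ie (by decide)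
    (fun p hp => pvF_ne_nil p (hprem p hp)) (fun p hp => pvF_ne_nil p (hpostm p hp))
    (fun p hp w hw => by
      rcases pvF_pre_ie p hp with h1 | h2
      · have hp2 := pvF_eg_entry p (hprem p hp) h1
        rw [h1, hp2]
        simpa using pvSkip_ie w hw
      · simpa using pvReplace_skip_noOv p.1 p.2 pvIE (pvF_ne_nil p (hprem p hp)) h2 w)
    (fun p hp w hw => pvG_pres p.1 p.2 (hprem p hp) w hw)
    (fun w => by simp)
    (fun p hp w => by
      simpa using pvReplace_skip_noOv p.1 p.2 pvPhIE (pvF_ne_nil p (hpostm p hp))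
        (pvF_noOv_ph p (hpostm p hp) (pvIE, pvPhIE) pvF_ie_mem) w)
    u hg
  simpa using this

theorem pvFind_some : ∀ (ps : List (List Char × List Char)) (t a ph : List Char),
    pvFind t ps = some (a, ph) → (a, ph) ∈ ps ∧ a <+: t := by
  intro ps
  induction ps with
  | nil => intro t a ph h; simp [pvFind] at h
  | cons p ps' ih =>
    intro t a ph h
    rw [pvFind] at h
    split at h
    · rename_i hcond
      obtain ⟨h1, h2⟩ : p.1 = a ∧ p.2 = ph := by
        cases p; injection h with h; injection h with h1 h2; exact ⟨h1, h2⟩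
      refine ⟨by rw [← h1, ← h2]; simp, ?_⟩
      rw [← h1]; exact List.isPrefixOf_iff_prefix.mp hcond
    · obtain ⟨hm, h2⟩ := ih t a ph h
      exact ⟨by simp [hm], h2⟩

theorem pvFind_none : ∀ (ps : List (List Char × List Char)) (t : List Char),
    pvFind t ps = none → ∀ p ∈ ps, ¬ p.1 <+: t := by
  intro ps
  induction ps with
  | nil => intro t _ p hp; simp at hp
  | cons q ps' ih =>
    intro t h p hp hpre
    rw [pvFind] at h
    split at h
    · exact absurd h (by simp)
    · rename_i hcond
      rcases List.mem_cons.mp hp with rfl | hp'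
      · exact hcond (List.isPrefixOf_iff_prefix.mpr hpre)
      · exact ih t h p hp' hpre

theorem pvScanGo_norm : ∀ (f : Nat) (l : List Char),
    l.length ≤ f → pvScanGo f l = pvScanGo l.length l := by
  intro f
  induction f using Nat.strong_induction_on with
  | _ f ihf =>
    intro l h1
    cases l with
    | nil => cases f <;> rfl
    | cons c s =>
      cases f with
      | zero => simp at h1
      | succ f' =>
        have hs : s.length ≤ f' := by simp at h1; omega
        show _ = pvScanGo (s.length + 1) (c :: s)
        rw [pvScanGo, pvScanGo]
        cases hf : pvFind (c :: s) pvTable with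
        | none =>
          simp only []
          congr 1
          exact ihf f' (by omega) s hs
        | some p =>
          simp only []
          congr 1
          have hl : (s.drop (p.1.length - 1)).length ≤ s.length := by simp
          rw [ihf f' (by omega) _ (le_trans hl hs),
            ihf s.length (by omega) _ hl]

def pvScanL (t : List Char) : List Char := pvScanGo t.length t

theorem pvScan_cons_none (c : Char) (s : List Char)
    (hf : pvFind (c :: s) pvTable = none) : pvScanL (c :: s) = c :: pvScanL s := by
  show pvScanGo (s.length + 1) (c :: s) = _
  rw [pvScanGo, hf]
  rfl

theorem pvScan_cons_some (c : Char) (s : List Char) (a ph : List Char)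
    (hf : pvFind (c :: s) pvTable = some (a, ph)) :
    pvScanL (c :: s) = ph ++ pvScanL (s.drop (a.length - 1)) := by
  show pvScanGo (s.length + 1) (c :: s) = _
  rw [pvScanGo, hf]
  simp only []
  congr 1
  exact pvScanGo_norm s.length _ (by simp)

theorem pvACore_nil : pvACore [] = [] := by decide

-- main equivalence at the character level, on texts avoiding the 'i.e.g.' overlap
theorem pvMain : ∀ (n : Nat) (t : List Char), t.length ≤ n → ¬ pvIEG <:+: t →
    pvACore t = pvScanL t := by
  intro n
  induction n with
  | zero =>
    intro t ht _
    have : t = [] := List.length_eq_zero_iff.mp (Nat.le_zero.mp ht)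
    subst this
    exact pvACore_nil
  | succ n ih =>
    intro t ht hno
    cases t with
    | nil => exact pvACore_nil
    | cons c s =>
      have hslen : s.length ≤ n := by simp at ht; omega
      have hsno : ¬ pvIEG <:+: s := fun hx =>
        hno (hx.trans (List.suffix_cons c s).isInfix)
      cases hf : pvFind (c :: s) pvTable with
      | none =>
        rw [pvScan_cons_none c s hf,
          pvACore_head_nomatch c s (pvFind_none pvTable (c :: s) hf), ih s hslen hsno]
      | some aph =>
        obtain ⟨a, ph⟩ := aph
        obtain ⟨hmem, hpre⟩ := pvFind_some pvTable (c :: s) a ph hf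
        have ha := pvF_ne_nil (a, ph) hmem
        obtain ⟨u, hu⟩ := hpre
        have hdrop : s.drop (a.length - 1) = u := by
          cases a with
          | nil => exact absurd rfl ha
          | cons x tl =>
            have hs : s = tl ++ u := by
              injection hu with h1 h2
              exact h2.symm
            rw [hs]
            simp
        rw [pvScan_cons_some c s a ph hf, hdrop]
        have huno : ¬ pvIEG <:+: u := fun hx =>
          hno (hx.trans (by rw [← hu]; exact (List.suffix_append a u).isInfix))
        have hulen : u.length ≤ n := by
          have : (c :: s).length = a.length + u.length := by rw [← hu]; simp
          simp at ht this
          have ha1 : 1 ≤ a.length := by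
            cases a with
            | nil => exact absurd rfl ha
            | cons _ _ => simp
          omega
        by_cases hie : a = pvIE
        · subst hie
          have hph : ph = pvPhIE := pvF_ie_entry (pvIE, ph) hmem rfl
          subst hph
          have hg : ¬ ['g', '.'] <+: u := by
            rintro ⟨v, hv⟩
            apply hno
            refine ⟨[], v, ?_⟩
            rw [← hu, ← hv]
            rfl
          rw [← hu, pvACore_head_ie u hg, ih u hulen huno]
        · rw [← hu, pvACore_head a ph hmem hie u, ih u hulen huno]

theorem pvBridgeA (text : String) : (handle_abbreviations_py text).toList = pvACore text.toList := by
  simp only [handle_abbreviations_py, pvAbbreviations, List.foldl_cons, List.foldl_nil,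
    PySem.Str.toList_replace,
    (show ("Dr." : String).toList = ['D', 'r', '.'] from rfl),
    (show ("Mr." : String).toList = ['M', 'r', '.'] from rfl),
    (show ("Mrs." : String).toList = ['M', 'r', 's', '.'] from rfl),
    (show ("Ms." : String).toList = ['M', 's', '.'] from rfl),
    (show ("Prof." : String).toList = ['P', 'r', 'o', 'f', '.'] from rfl),
    (show ("Inc." : String).toList = ['I', 'n', 'c', '.'] from rfl),
    (show ("Ltd." : String).toList = ['L', 't', 'd', '.'] from rfl),
    (show ("Corp." : String).toList = ['C', 'o', 'r', 'p', '.'] from rfl),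
    (show ("etc." : String).toList = ['e', 't', 'c', '.'] from rfl),
    (show ("vs." : String).toList = ['v', 's', '.'] from rfl),
    (show ("e.g." : String).toList = ['e', '.', 'g', '.'] from rfl),
    (show ("i.e." : String).toList = ['i', '.', 'e', '.'] from rfl),
    (show ("cf." : String).toList = ['c', 'f', '.'] from rfl),
    (show ("al." : String).toList = ['a', 'l', '.'] from rfl),
    (show ("Co." : String).toList = ['C', 'o', '.'] from rfl),
    (show ("Jr." : String).toList = ['J', 'r', '.'] from rfl),
    (show ("Sr." : String).toList = ['S', 'r', '.'] from rfl),
    (show ("." : String).toList = ['.'] from rfl),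
    (show ("<!DOT!>" : String).toList = ['<', '!', 'D', 'O', 'T', '!', '>'] from rfl),
    (show PySem.Chars.replace ['D', 'r', '.'] ['.'] ['<', '!', 'D', 'O', 'T', '!', '>'] = ['D', 'r', '<', '!', 'D', 'O', 'T', '!', '>'] by decide),
    (show PySem.Chars.replace ['M', 'r', '.'] ['.'] ['<', '!', 'D', 'O', 'T', '!', '>'] = ['M', 'r', '<', '!', 'D', 'O', 'T', '!', '>'] by decide),
    (show PySem.Chars.replace ['M', 'r', 's', '.'] ['.'] ['<', '!', 'D', 'O', 'T', '!', '>'] = ['M', 'r', 's', '<', '!', 'D', 'O', 'T', '!', '>'] by decide),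
    (show PySem.Chars.replace ['M', 's', '.'] ['.'] ['<', '!', 'D', 'O', 'T', '!', '>'] = ['M', 's', '<', '!', 'D', 'O', 'T', '!', '>'] by decide),
    (show PySem.Chars.replace ['P', 'r', 'o', 'f', '.'] ['.'] ['<', '!', 'D', 'O', 'T', '!', '>'] = ['P', 'r', 'o', 'f', '<', '!', 'D', 'O', 'T', '!', '>'] by decide),
    (show PySem.Chars.replace ['I', 'n', 'c', '.'] ['.'] ['<', '!', 'D', 'O', 'T', '!', '>'] = ['I', 'n', 'c', '<', '!', 'D', 'O', 'T', '!', '>'] by decide),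
    (show PySem.Chars.replace ['L', 't', 'd', '.'] ['.'] ['<', '!', 'D', 'O', 'T', '!', '>'] = ['L', 't', 'd', '<', '!', 'D', 'O', 'T', '!', '>'] by decide),
    (show PySem.Chars.replace ['C', 'o', 'r', 'p', '.'] ['.'] ['<', '!', 'D', 'O', 'T', '!', '>'] = ['C', 'o', 'r', 'p', '<', '!', 'D', 'O', 'T', '!', '>'] by decide),
    (show PySem.Chars.replace ['e', 't', 'c', '.'] ['.'] ['<', '!', 'D', 'O', 'T', '!', '>'] = ['e', 't', 'c', '<', '!', 'D', 'O', 'T', '!', '>'] by decide),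
    (show PySem.Chars.replace ['v', 's', '.'] ['.'] ['<', '!', 'D', 'O', 'T', '!', '>'] = ['v', 's', '<', '!', 'D', 'O', 'T', '!', '>'] by decide),
    (show PySem.Chars.replace ['e', '.', 'g', '.'] ['.'] ['<', '!', 'D', 'O', 'T', '!', '>'] = ['e', '<', '!', 'D', 'O', 'T', '!', '>', 'g', '<', '!', 'D', 'O', 'T', '!', '>'] by decide),
    (show PySem.Chars.replace ['i', '.', 'e', '.'] ['.'] ['<', '!', 'D', 'O', 'T', '!', '>'] = ['i', '<', '!', 'D', 'O', 'T', '!', '>', 'e', '<', '!', 'D', 'O', 'T', '!', '>'] by decide),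
    (show PySem.Chars.replace ['c', 'f', '.'] ['.'] ['<', '!', 'D', 'O', 'T', '!', '>'] = ['c', 'f', '<', '!', 'D', 'O', 'T', '!', '>'] by decide),
    (show PySem.Chars.replace ['a', 'l', '.'] ['.'] ['<', '!', 'D', 'O', 'T', '!', '>'] = ['a', 'l', '<', '!', 'D', 'O', 'T', '!', '>'] by decide),
    (show PySem.Chars.replace ['C', 'o', '.'] ['.'] ['<', '!', 'D', 'O', 'T', '!', '>'] = ['C', 'o', '<', '!', 'D', 'O', 'T', '!', '>'] by decide),
    (show PySem.Chars.replace ['J', 'r', '.'] ['.'] ['<', '!', 'D', 'O', 'T', '!', '>'] = ['J', 'r', '<', '!', 'D', 'O', 'T', '!', '>'] by decide),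
    (show PySem.Chars.replace ['S', 'r', '.'] ['.'] ['<', '!', 'D', 'O', 'T', '!', '>'] = ['S', 'r', '<', '!', 'D', 'O', 'T', '!', '>'] by decide)]
  simp only [pvACore, pvTable, List.foldl_cons, List.foldl_nil, pvStep]

-- ===== VERDICT (by name: the statement is the Claim_ definition above) =====
theorem handle_abbreviations_py_spec : Claim_equal_handle_abbreviations_py := by
  intro text _ hpre
  show handle_abbreviations_py text = handle_abbreviations_py_alt text
  have h1 : (handle_abbreviations_py text).toList = pvScanL text.toList := by
    rw [pvBridgeA text]
    exact pvMain text.toList.length text.toList (le_refl _) hpre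
  calc handle_abbreviations_py text
      = String.ofList (handle_abbreviations_py text).toList := String.ofList_toList.symm
    _ = String.ofList (pvScanL text.toList) := by rw [h1]
    _ = handle_abbreviations_py_alt text := rfl
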